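-- pv_equiv track=rewrite | github.com/thordur03/Thordur_skoli | FORR2HF05CF/aeifingaverkefni/rally.py | Fyrstu5
-- ===== SOURCE A (Python) =====
-- def Fyrstu5(strengur):
--
--     billaust = ""
--     for x in strengur:
--         if x == " ":
--             pass
--         else:
--             billaust=billaust+x
--     strengur = billaust
--
--
--     if len(strengur)>4:
--         fimmstafir = ""
--         for x in range(5):
--             fimmstafir = fimmstafir+strengur[x]
--         return "fyrstu fimm stafinir eru: " + fimmstafir
--     else:
--         return "orðið er undir 5 stöfum"
-- ===== SOURCE B (Python) =====
-- def Fyrstu5(strengur):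
--     buf = ""
--     cnt = 0
--     for c in strengur:
--         if c != " ":
--             buf += c
--             cnt += 1
--             if cnt == 5:
--                 break
--     if cnt == 5:
--         return "fyrstu fimm stafinir eru: " + buf
--     else:
--         return "orðið er undir 5 stöfum"
-- ===== Notes on version B (the rewrite author's own statement) =====
-- stated objective: faster
-- what changed: Replaces A's two sequential loops (strip all spaces into a full new string, then a fixed range(5) indexing loop) with one early-terminating scan that collects the first five non-space characters and stops.
import Mathlib
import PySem

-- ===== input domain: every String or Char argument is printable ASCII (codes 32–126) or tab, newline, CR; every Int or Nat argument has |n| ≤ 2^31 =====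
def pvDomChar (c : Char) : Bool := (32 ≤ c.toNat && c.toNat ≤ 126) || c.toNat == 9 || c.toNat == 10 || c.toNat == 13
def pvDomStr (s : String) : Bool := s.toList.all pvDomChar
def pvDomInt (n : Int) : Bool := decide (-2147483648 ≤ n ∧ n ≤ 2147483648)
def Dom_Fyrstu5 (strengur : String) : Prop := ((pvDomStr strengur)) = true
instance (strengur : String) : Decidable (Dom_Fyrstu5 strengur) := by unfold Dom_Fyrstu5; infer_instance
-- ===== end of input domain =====

-- B replaces A's two sequential loops with one early-terminating scan; objective: simpler.

-- ===== PORT A =====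
-- for x in strengur: skip spaces, else billaust = billaust + x
-- then if len > 4: fimmstafir built by indexing x in range(5) (indices always in range there,
-- so pyGetD with a dummy default is exact); else the short-word message.
def Fyrstu5 (strengur : String) : String :=
  let billaust : List Char :=
    strengur.toList.foldl (fun acc x => if x = ' ' then acc else acc ++ [x]) []
  let s := billaust
  if s.length > 4 then
    let fimmstafir : List Char :=
      (PySem.List.pyRange 0 5 1).foldl (fun acc x => acc ++ [PySem.List.pyGetD s x ' ']) []
    String.mk ("fyrstu fimm stafinir eru: ".toList ++ fimmstafir)
  else
    "orðið er undir 5 stöfum"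

-- ===== PORT B =====
-- one pass: append each non-space char to buf, count, break at 5
def altLoop : List Char → List Char → Nat → (List Char × Nat)
  | [], buf, cnt => (buf, cnt)
  | c :: rest, buf, cnt =>
    if c = ' ' then altLoop rest buf cnt
    else if cnt + 1 = 5 then (buf ++ [c], cnt + 1)   -- break
    else altLoop rest (buf ++ [c]) (cnt + 1)

def Fyrstu5_alt (strengur : String) : String :=
  let r := altLoop strengur.toList [] 0
  if r.2 = 5 then String.mk ("fyrstu fimm stafinir eru: ".toList ++ r.1)
  else "orðið er undir 5 stöfum"

-- ===== PRECONDITION & SPEC =====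
def Spec_Fyrstu5 (strengur : String) (out : String) : Prop := out = Fyrstu5_alt strengur
instance (strengur : String) (out : String) : Decidable (Spec_Fyrstu5 strengur out) := by unfold Spec_Fyrstu5; infer_instance

-- ===== CLAIM (what is proved, stated in full; the proofs are below) =====
def Claim_equal_Fyrstu5 : Prop := ∀ (strengur : String), Dom_Fyrstu5 strengur → Spec_Fyrstu5 strengur (Fyrstu5 strengur)

-- ===== LEMMAS AND PROOFS =====

theorem stripLoop_eq_filter (l : List Char) (acc : List Char) :
    l.foldl (fun acc x => if x = ' ' then acc else acc ++ [x]) acc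
      = acc ++ l.filter (fun x => x ≠ ' ') := by
  induction l generalizing acc with
  | nil => simp
  | cons c rest ih =>
    simp only [List.foldl_cons, List.filter_cons]
    by_cases h : c = ' ' <;> simp [h, ih]

theorem fimm_eq_take5 (s : List Char) (h : s.length > 4) :
    (PySem.List.pyRange 0 5 1).foldl (fun acc x => acc ++ [PySem.List.pyGetD s x ' ']) []
      = s.take 5 := by
  match s, h with
  | a :: b :: c :: d :: e :: rest, _ =>
    have hr : PySem.List.pyRange 0 5 1 = [0,1,2,3,4] := by decide
    rw [hr]
    simp only [List.foldl_cons, List.foldl_nil, List.nil_append]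
    norm_num [PySem.List.pyGetD_ofNat']
  | [], h => simp at h
  | [a], h => simp at h
  | [a,b], h => simp at h
  | [a,b,c], h => simp at h
  | [a,b,c,d], h => simp at h

theorem altLoop_spec (l : List Char) (buf : List Char) (cnt : Nat) (h : cnt < 5) :
    altLoop l buf cnt
      = (buf ++ (l.filter (fun x => x ≠ ' ')).take (5 - cnt),
         min 5 (cnt + (l.filter (fun x => x ≠ ' ')).length)) := by
  induction l generalizing buf cnt with
  | nil => simp [altLoop]; omega
  | cons c rest ih =>
    simp only [altLoop, List.filter_cons]
    by_cases hc : c = ' '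
    · simp [hc, ih _ _ h]
    · simp only [hc, if_false, decide_not]
      have hne : (c = ' ') = False := by simp [hc]
      by_cases h5 : cnt + 1 = 5
      · simp only [h5]
        have : 5 - cnt = 1 := by omega
        simp [this]
        omega
      · simp only [if_neg h5]
        rw [ih _ _ (by omega)]
        have : 5 - cnt = (5 - (cnt + 1)) + 1 := by omega
        simp [this]
        omega

theorem Fyrstu5_eq (strengur : String) : Fyrstu5 strengur = Fyrstu5_alt strengur := by
  unfold Fyrstu5 Fyrstu5_alt
  rw [stripLoop_eq_filter, altLoop_spec _ _ _ (by omega)]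
  simp only [List.nil_append]
  set f := strengur.toList.filter (fun x => x ≠ ' ') with hf
  by_cases h : f.length > 4
  · rw [if_pos h, fimm_eq_take5 _ h]
    have h5 : min 5 (0 + f.length) = 5 := by omega
    rw [if_pos h5]
  · rw [if_neg h]
    have h5 : ¬ (min 5 (0 + f.length) = 5) := by omega
    rw [if_neg h5]

-- ===== VERDICT (by name: the statement is the Claim_ definition above) =====
theorem Fyrstu5_spec : Claim_equal_Fyrstu5 := by
  intro s _
  exact Fyrstu5_eq s
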